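-- pv_equiv track=rewrite | github.com/AdamZhouSE/pythonHomework | Code/CodeRecords/2340/60627/236920.py | f
-- ===== SOURCE A (Python) =====
-- def f(num):
--     sort = sorted(num)
--     for i in range(len(num)):
--         minima = sort[i]
--         ind = num.index(minima)
--         left = False
--         right = False
--         for j in range(len(num)):
--             if num[j] > minima and j < ind:
--                 left = True
--             if num[j] > minima and j > ind:
--                 right = True
--         if left and right:
--             return True
--         return False
-- ===== SOURCE B (Python) =====
-- def f(num):
--     if not num:
--         return None  # A also returns None on empty input
--     m = min(num)
--     ind = num.index(m)
--     left = any(x > m for x in num[:ind])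
--     right = any(x > m for x in num[ind + 1:])
--     return left and right
-- ===== Notes on version B (the rewrite author's own statement) =====
-- stated objective: faster
-- what changed: Replaces the sort plus the dead outer loop and the nested index scan with a direct O(n) computation: take min(num) and its first index, then two linear any-scans over the slices left and right of it.
-- outside the precondition, e.g. on f([]): A returns None, B returns None
import Mathlib
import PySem

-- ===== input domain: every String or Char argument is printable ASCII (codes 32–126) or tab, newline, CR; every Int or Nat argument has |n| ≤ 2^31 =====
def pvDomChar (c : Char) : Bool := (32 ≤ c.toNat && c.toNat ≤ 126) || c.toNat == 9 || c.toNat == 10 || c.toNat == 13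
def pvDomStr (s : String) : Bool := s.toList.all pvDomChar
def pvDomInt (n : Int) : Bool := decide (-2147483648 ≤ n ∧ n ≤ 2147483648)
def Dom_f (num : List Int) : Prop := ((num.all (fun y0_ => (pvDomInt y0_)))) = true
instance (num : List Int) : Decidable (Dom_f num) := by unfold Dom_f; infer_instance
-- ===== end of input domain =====

-- B replaces A's sort + dead outer loop + nested index scan by min/first-index plus two
-- any-scans over the slices left and right of the first minimum (simpler, no sort).

-- ===== PORT A =====
-- inner 'for j in range(len(num))' body: state (left, right)
def fBody (minima ind : Int) (num : List Int) (s : Bool × Bool) (j : Int) : Bool × Bool :=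
  let x := PySem.List.pyGet? num j |>.getD 0   -- j ∈ range(len num): in range, exact
  let s1 := if x > minima ∧ j < ind then (true, s.2) else s
  if x > minima ∧ j > ind then (s1.1, true) else s1

-- outer 'for i in range(len(num))': the body returns unconditionally, so only the head index runs
def fLoop (num sort : List Int) : List Int → Option Bool
  | [] => none        -- loop falls through (only when num = []): Python returns None
  | i :: _rest =>
    let minima := PySem.List.pyGet? sort i |>.getD 0   -- i in range: exact
    let ind : Nat := (PySem.List.index? num minima).getD 0  -- minima ∈ num always, so .index never raises
    let p := (PySem.List.pyRange 0 (num.length : Int) 1).foldl (fBody minima (ind : Int) num) (false, false)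
    if p.1 && p.2 then some true else some false

def f (num : List Int) : Bool :=
  let sort := PySem.List.sorted num (fun x => x) false
  (fLoop num sort (PySem.List.pyRange 0 (num.length : Int) 1)).getD false  -- None (empty num) outside Pre_

-- ===== PORT B =====
def f_alt (num : List Int) : Bool :=
  match PySem.List.min? num (fun x => x) with
  | none => false     -- empty input: Python B returns None; outside Pre_
  | some m =>
    let ind : Nat := (PySem.List.index? num m).getD 0   -- m ∈ num, never raises
    let left := (PySem.List.slice num (some 0) (some (ind : Int))).any (fun x => decide (x > m))
    let right := (PySem.List.slice num (some ((ind : Int) + 1)) none).any (fun x => decide (x > m))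
    left && right

-- ===== PRECONDITION & SPEC =====
-- Pre_ excludes only the empty list, on which A returns None instead of a bool.
def Pre_f (num : List Int) : Prop := num ≠ []
instance (num : List Int) : Decidable (Pre_f num) := by unfold Pre_f; infer_instance
def pvWitness_f : List Int := [3, 1, 2]
def Spec_f (num : List Int) (out : Bool) : Prop := out = f_alt num
instance (num : List Int) (out : Bool) : Decidable (Spec_f num out) := by unfold Spec_f; infer_instance

-- ===== CLAIM (what is proved, stated in full; the proofs are below) =====
def Claim_equal_f : Prop := ∀ (num : List Int), Dom_f num → Pre_f num → Spec_f num (f num)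

-- ===== LEMMAS AND PROOFS =====

theorem fBody_step (minima ind : Int) (num : List Int) (l r : Bool) (j : Int) :
    fBody minima ind num (l, r) j =
      (l || decide ((PySem.List.pyGet? num j).getD 0 > minima ∧ j < ind),
       r || decide ((PySem.List.pyGet? num j).getD 0 > minima ∧ j > ind)) := by
  unfold fBody
  by_cases h1 : (PySem.List.pyGet? num j).getD 0 > minima ∧ j < ind
  · have h2 : ¬ ind < j := fun hlt => absurd h1.2 (by omega)
    simp [h1, h2]
  · by_cases h2 : (PySem.List.pyGet? num j).getD 0 > minima ∧ j > ind
    · have h3 : ¬ j < ind := fun hlt => h1 ⟨h2.1, hlt⟩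
      simp [h2, h3]
    · simp [h1, h2]

theorem fFold_char (minima ind : Int) (num : List Int) (lo hi : Int) (l r : Bool) :
    (PySem.List.pyRange lo hi 1).foldl (fBody minima ind num) (l, r) =
      (l || (PySem.List.pyRange lo hi 1).any
              (fun j => decide ((PySem.List.pyGet? num j).getD 0 > minima ∧ j < ind)),
       r || (PySem.List.pyRange lo hi 1).any
              (fun j => decide ((PySem.List.pyGet? num j).getD 0 > minima ∧ j > ind))) := by
  by_cases h : hi ≤ lo
  · simp [PySem.List.pyRange_one_eq_nil h]
  · have hlt : lo < hi := by omega
    have hrec := fFold_char minima ind num (lo + 1) hi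
      (l || decide ((PySem.List.pyGet? num lo).getD 0 > minima ∧ lo < ind))
      (r || decide ((PySem.List.pyGet? num lo).getD 0 > minima ∧ lo > ind))
    rw [PySem.List.pyRange_one_cons hlt]
    simp only [List.foldl_cons, List.any_cons, fBody_step, hrec, Bool.or_assoc]
termination_by (hi - lo).toNat
decreasing_by omega

theorem f_spec_aux (num : List Int) (h : num ≠ []) : f num = f_alt num := by
  -- min? is some
  obtain ⟨m, hm⟩ : ∃ m, PySem.List.min? num (fun x => x) = some m := by
    rcases Option.eq_none_or_eq_some (PySem.List.min? num (fun x => x)) with h0 | h0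
    · exact absurd ((PySem.List.min?_eq_none_iff _ _).mp h0) h
    · exact h0
  have hmmem : m ∈ num := PySem.List.min?_mem hm
  have hmmin : ∀ y ∈ num, m ≤ y := PySem.List.min?_isMin hm
  -- the sorted list is nonempty and its head is m
  obtain ⟨b, s', hs⟩ : ∃ b s', PySem.List.sorted num (fun x => x) false = b :: s' := by
    cases hcase : PySem.List.sorted num (fun x => x) false with
    | nil => exact absurd ((PySem.List.sorted_eq_nil_iff _ _ _).mp hcase) h
    | cons b s' => exact ⟨b, s', rfl⟩
  have hbm : b = m := by
    have h1 : b ≤ m := PySem.List.key_head_sorted_le num (fun x => x) hs m hmmem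
    have h2 : m ≤ b := hmmin b ((PySem.List.mem_sorted _ _ _ _).mp (hs ▸ List.mem_cons_self))
    omega
  -- range(len num) starts with 0
  have hlen : (0 : Int) < (num.length : Int) := by
    cases num with
    | nil => exact absurd rfl h
    | cons a t => simp
  have hrange : PySem.List.pyRange 0 (num.length : Int) 1 =
      0 :: PySem.List.pyRange 1 (num.length : Int) 1 := PySem.List.pyRange_one_cons hlen
  -- the index used by both
  set ind : Nat := (PySem.List.index? num m).getD 0 with hind
  have hindlt : ind < num.length := by
    obtain ⟨k, hk⟩ : ∃ k, PySem.List.index? num m = some k :=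
      Option.isSome_iff_exists.mp ((PySem.List.index?_isSome_iff _ _).mpr hmmem)
    obtain ⟨hk2, _, _⟩ := PySem.List.getElem_of_index?_eq_some hk
    simp only [hind, hk, Option.getD_some]
    exact hk2
  unfold f fLoop
  rw [hrange]
  simp only [hs, PySem.List.pyGet?_zero_cons, Option.getD_some, hbm]
  rw [← hrange, fFold_char]
  unfold f_alt
  rw [hm]
  simp only [Bool.false_or]
  -- rewrite the slices
  rw [PySem.List.slice_zero_start, PySem.List.slice_to_natCast]
  have hcast : ((ind : Int) + 1) = ((ind + 1 : Nat) : Int) := by push_cast; ring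
  rw [hcast, PySem.List.slice_from_natCast]
  -- left component, then right component
  have hleft :
      (PySem.List.pyRange 0 (num.length : Int) 1).any
        (fun j => decide ((PySem.List.pyGet? num j).getD 0 > m ∧ j < (ind : Int))) =
      (num.take ind).any (fun x => decide (x > m)) := by
    rcases Bool.eq_false_or_eq_true ((num.take ind).any (fun x => decide (x > m))) with hr | hr
    all_goals rw [hr]
    · rw [List.any_eq_true] at hr ⊢
      obtain ⟨x, hx, hxc⟩ := hr
      rw [List.mem_take_iff_getElem] at hx
      obtain ⟨i, hi, hxi⟩ := hx
      refine ⟨(i : Int), PySem.List.mem_pyRange_one.mpr ⟨by omega, by omega⟩, ?_⟩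
      rw [PySem.List.pyGet?_natCast, List.getElem?_eq_getElem (by omega)]
      simp only [Option.getD_some, decide_eq_true_eq] at hxc ⊢
      exact ⟨hxi ▸ hxc, by omega⟩
    · rw [List.any_eq_false] at hr ⊢
      intro j hj
      rw [PySem.List.mem_pyRange_one] at hj
      simp only [decide_eq_true_eq, not_and, not_lt] at hr ⊢
      intro hgt
      by_contra hlt
      push Not at hlt
      have hjn : j.toNat < ind := by omega
      have hjl : j.toNat < num.length := by omega
      have hc : ((j.toNat : Nat) : Int) = j := by omega
      rw [← hc, PySem.List.pyGet?_natCast, List.getElem?_eq_getElem hjl] at hgt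
      simp only [Option.getD_some] at hgt
      have hmem : num[j.toNat] ∈ num.take ind := by
        rw [List.mem_take_iff_getElem]
        exact ⟨j.toNat, by omega, rfl⟩
      have := hr _ hmem
      omega
  have hright :
      (PySem.List.pyRange 0 (num.length : Int) 1).any
        (fun j => decide ((PySem.List.pyGet? num j).getD 0 > m ∧ j > (ind : Int))) =
      (num.drop (ind + 1)).any (fun x => decide (x > m)) := by
    rcases Bool.eq_false_or_eq_true ((num.drop (ind + 1)).any (fun x => decide (x > m))) with hr | hr
    all_goals rw [hr]
    · rw [List.any_eq_true] at hr ⊢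
      obtain ⟨x, hx, hxc⟩ := hr
      rw [List.mem_drop_iff_getElem] at hx
      obtain ⟨i, hi, hxi⟩ := hx
      refine ⟨((ind + 1 + i : Nat) : Int), PySem.List.mem_pyRange_one.mpr ⟨by omega, by omega⟩, ?_⟩
      rw [PySem.List.pyGet?_natCast, List.getElem?_eq_getElem (by omega)]
      simp only [Option.getD_some, decide_eq_true_eq] at hxc ⊢
      exact ⟨hxi ▸ hxc, by omega⟩
    · rw [List.any_eq_false] at hr ⊢
      intro j hj
      rw [PySem.List.mem_pyRange_one] at hj
      simp only [decide_eq_true_eq, not_and, not_lt] at hr ⊢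
      intro hgt
      by_contra hlt
      push Not at hlt
      have hjl : j.toNat < num.length := by omega
      have hjd : ind + 1 ≤ j.toNat := by omega
      have hc : ((j.toNat : Nat) : Int) = j := by omega
      rw [← hc, PySem.List.pyGet?_natCast, List.getElem?_eq_getElem hjl] at hgt
      simp only [Option.getD_some] at hgt
      have hmem : num[j.toNat] ∈ num.drop (ind + 1) := by
        rw [List.mem_drop_iff_getElem]
        exact ⟨j.toNat - (ind + 1), by omega, by congr 1; omega⟩
      have := hr _ hmem
      omega
  rw [hleft, hright]
  split
  · next hc => simpa using hc.symm
  · next hc => simpa using ((Bool.not_eq_true _).mp hc).symm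

-- ===== VERDICT (by name: the statement is the Claim_ definition above) =====
theorem f_spec : Claim_equal_f := by
  intro num _ hpre
  unfold Spec_f
  exact f_spec_aux num hpre
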